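-- pv_equiv track=rewrite | github.com/MO-BCCRC/titan_workflow | components/parse_titan/component_seed/parseutils.py | sort_snpeff
-- ===== SOURCE A (Python) =====
-- def sort_snpeff(snpeff_ann):
--     '''
--     sort snpeff annotations by their modifier
--     '''
--     high = []
--     mod = []
--     low = []
--     oth = []
--
--     for val in snpeff_ann:
--         if val[3] == 'HIGH':
--             high.append(val)
--         elif val[3] == 'MODERATE':
--             mod.append(val)
--         elif val[3] == 'LOW':
--             low.append(val)
--         else:
--             oth.append(val)
--
--     return high + mod + low + oth
-- ===== SOURCE B (Python) =====
-- def sort_snpeff(snpeff_ann):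
--     '''
--     sort snpeff annotations by their modifier
--     '''
--     rank = {'HIGH': 0, 'MODERATE': 1, 'LOW': 2}
--     return sorted(snpeff_ann, key=lambda val: rank.get(val[3], 3))
-- ===== Notes on version B (the rewrite author's own statement) =====
-- stated objective: idiomatic
-- what changed: Replaces the four-accumulator bucket loop with a single stable sort keyed by an impact-rank dict (unknown impacts rank last), relying on sort stability for the original relative order.
import Mathlib
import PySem

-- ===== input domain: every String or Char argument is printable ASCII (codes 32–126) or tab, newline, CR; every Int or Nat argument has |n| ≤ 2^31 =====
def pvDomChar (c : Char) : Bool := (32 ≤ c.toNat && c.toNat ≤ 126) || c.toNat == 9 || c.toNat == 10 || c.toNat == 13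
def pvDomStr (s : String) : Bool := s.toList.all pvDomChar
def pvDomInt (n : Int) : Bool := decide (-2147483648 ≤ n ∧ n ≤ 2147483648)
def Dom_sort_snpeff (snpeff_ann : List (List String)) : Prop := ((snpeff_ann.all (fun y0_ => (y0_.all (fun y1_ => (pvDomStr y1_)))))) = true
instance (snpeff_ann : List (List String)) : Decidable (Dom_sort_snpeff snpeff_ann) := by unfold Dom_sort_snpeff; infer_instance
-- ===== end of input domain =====

-- B replaces A's four-bucket partition loop with one stable sort keyed by impact rank (idiomatic rewrite).
-- Note: both Pythons raise IndexError on a row shorter than 4 entries; Pre_ excludes those.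

-- ===== PORT A =====
def sort_snpeff (snpeff_ann : List (List String)) : List (List String) :=
  -- four accumulators high/mod/low/oth; val[3] is in range on Pre_ (short rows are excluded)
  let st := snpeff_ann.foldl
    (fun (st : List (List String) × List (List String) × List (List String) × List (List String)) val =>
      if PySem.List.pyGetD val 3 "" = "HIGH" then (st.1 ++ [val], st.2.1, st.2.2.1, st.2.2.2)
      else if PySem.List.pyGetD val 3 "" = "MODERATE" then (st.1, st.2.1 ++ [val], st.2.2.1, st.2.2.2)
      else if PySem.List.pyGetD val 3 "" = "LOW" then (st.1, st.2.1, st.2.2.1 ++ [val], st.2.2.2)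
      else (st.1, st.2.1, st.2.2.1, st.2.2.2 ++ [val]))
    ([], [], [], [])
  st.1 ++ st.2.1 ++ st.2.2.1 ++ st.2.2.2

-- ===== PORT B =====
-- rank = {'HIGH': 0, 'MODERATE': 1, 'LOW': 2}
def snpeffRank : PySem.Dict String Int :=
  ((PySem.Dict.empty.insert "HIGH" 0).insert "MODERATE" 1).insert "LOW" 2

def sort_snpeff_alt (snpeff_ann : List (List String)) : List (List String) :=
  PySem.List.sorted snpeff_ann (fun val => snpeffRank.getD (PySem.List.pyGetD val 3 "") 3)

-- ===== PRECONDITION & SPEC =====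
-- Pre_ excludes inputs containing a row with fewer than 4 fields, on which A (val[3]) raises IndexError.
def Pre_sort_snpeff (snpeff_ann : List (List String)) : Prop :=
  ∀ val ∈ snpeff_ann, 4 ≤ val.length
instance (snpeff_ann : List (List String)) : Decidable (Pre_sort_snpeff snpeff_ann) := by
  unfold Pre_sort_snpeff; infer_instance
def pvWitness_sort_snpeff : List (List String) :=
  [["g", "c.1A>T", "p.X", "MODERATE"], ["g", "c.2A>T", "p.Y", "HIGH"]]

def Spec_sort_snpeff (snpeff_ann : List (List String)) (out : List (List String)) : Prop := out = sort_snpeff_alt snpeff_ann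
instance (snpeff_ann : List (List String)) (out : List (List String)) : Decidable (Spec_sort_snpeff snpeff_ann out) := by unfold Spec_sort_snpeff; infer_instance

-- ===== CLAIM (what is proved, stated in full; the proofs are below) =====
def Claim_equal_sort_snpeff : Prop := ∀ (snpeff_ann : List (List String)), Dom_sort_snpeff snpeff_ann → Pre_sort_snpeff snpeff_ann → Spec_sort_snpeff snpeff_ann (sort_snpeff snpeff_ann)

-- ===== LEMMAS AND PROOFS =====

-- the rank key used by B
def snpKey (val : List String) : Int := snpeffRank.getD (PySem.List.pyGetD val 3 "") 3

theorem getD_rank (s : String) :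
    snpeffRank.getD s 3 =
      (if s = "HIGH" then (0 : Int) else if s = "MODERATE" then 1 else if s = "LOW" then 2 else 3) := by
  by_cases hH : s = "HIGH"
  · subst hH; decide
  · by_cases hM : s = "MODERATE"
    · subst hM; decide
    · by_cases hL : s = "LOW"
      · subst hL; decide
      · have eH : ("HIGH" == s) = false := beq_eq_false_iff_ne.mpr (fun h => hH h.symm)
        have eM : ("MODERATE" == s) = false := beq_eq_false_iff_ne.mpr (fun h => hM h.symm)
        have eL : ("LOW" == s) = false := beq_eq_false_iff_ne.mpr (fun h => hL h.symm)
        simp [hH, hM, hL, snpeffRank, PySem.Dict.getD, PySem.Dict.get?, PySem.Dict.insert,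
          PySem.Dict.empty, List.find?, eH, eM, eL]

theorem snpKey_eq (val : List String) :
    snpKey val =
      (if PySem.List.pyGetD val 3 "" = "HIGH" then 0
       else if PySem.List.pyGetD val 3 "" = "MODERATE" then 1
       else if PySem.List.pyGetD val 3 "" = "LOW" then 2 else 3) := by
  simp [snpKey, getD_rank]

theorem before_false (x y : List String) (h : snpKey y ≤ snpKey x) :
    decide (snpKey x < snpKey y) = false := by simp; omega

theorem insertBy_split {α : Type} (before : α → α → Bool) (x : α) (ys zs : List α)
    (h1 : ∀ y ∈ ys, before x y = false) (h2 : ∀ z ∈ zs, before x z = true) :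
    PySem.List.insertBy before x (ys ++ zs) = ys ++ x :: zs := by
  induction ys with
  | nil =>
    cases zs with
    | nil => rfl
    | cons z zs => simp [PySem.List.insertBy, h2 z (by simp)]
  | cons y ys ih =>
    simp only [List.cons_append, PySem.List.insertBy, h1 y (by simp)]
    simp only [Bool.false_eq_true, if_false, List.cons.injEq, true_and]
    exact ih (fun y hy => h1 y (by simp [hy]))

-- A's loop, characterised: it appends to each bucket the elements of that rank, in order.
theorem A_state (xs : List (List String))
    (h m l o : List (List String)) :
    xs.foldl
      (fun (st : List (List String) × List (List String) × List (List String) × List (List String)) val =>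
        if PySem.List.pyGetD val 3 "" = "HIGH" then (st.1 ++ [val], st.2.1, st.2.2.1, st.2.2.2)
        else if PySem.List.pyGetD val 3 "" = "MODERATE" then (st.1, st.2.1 ++ [val], st.2.2.1, st.2.2.2)
        else if PySem.List.pyGetD val 3 "" = "LOW" then (st.1, st.2.1, st.2.2.1 ++ [val], st.2.2.2)
        else (st.1, st.2.1, st.2.2.1, st.2.2.2 ++ [val]))
      (h, m, l, o)
    = (h ++ xs.filter (fun v => snpKey v == 0),
       m ++ xs.filter (fun v => snpKey v == 1),
       l ++ xs.filter (fun v => snpKey v == 2),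
       o ++ xs.filter (fun v => snpKey v == 3)) := by
  induction xs generalizing h m l o with
  | nil => simp
  | cons x xs ih =>
    simp only [List.foldl_cons, List.filter_cons]
    by_cases hH : PySem.List.pyGetD x 3 "" = "HIGH"
    · simp [hH, ih, snpKey_eq]
    · by_cases hM : PySem.List.pyGetD x 3 "" = "MODERATE"
      · simp [hM, ih, snpKey_eq]
      · by_cases hL : PySem.List.pyGetD x 3 "" = "LOW"
        · simp [hL, ih, snpKey_eq]
        · simp [hH, hM, hL, ih, snpKey_eq]

theorem snpKey_cases (v : List String) :
    snpKey v = 0 ∨ snpKey v = 1 ∨ snpKey v = 2 ∨ snpKey v = 3 := by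
  rw [snpKey_eq]; split_ifs <;> simp

-- B's insertion-sort loop, characterised: given rank-homogeneous buckets, it extends them in place.
theorem B_state (xs : List (List String)) (b0 b1 b2 b3 : List (List String))
    (h0 : ∀ v ∈ b0, snpKey v = 0) (h1 : ∀ v ∈ b1, snpKey v = 1)
    (h2 : ∀ v ∈ b2, snpKey v = 2) (h3 : ∀ v ∈ b3, snpKey v = 3) :
    xs.foldl (fun acc x => PySem.List.insertBy (fun a b => decide (snpKey a < snpKey b)) x acc)
      (b0 ++ b1 ++ b2 ++ b3)
    = (b0 ++ xs.filter (fun v => snpKey v == 0))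
      ++ (b1 ++ xs.filter (fun v => snpKey v == 1))
      ++ (b2 ++ xs.filter (fun v => snpKey v == 2))
      ++ (b3 ++ xs.filter (fun v => snpKey v == 3)) := by
  induction xs generalizing b0 b1 b2 b3 with
  | nil => simp
  | cons x xs ih =>
    simp only [List.foldl_cons, List.filter_cons]
    rcases snpKey_cases x with hx | hx | hx | hx
    · have e : PySem.List.insertBy (fun a b => decide (snpKey a < snpKey b)) x (b0 ++ b1 ++ b2 ++ b3)
          = (b0 ++ [x]) ++ b1 ++ b2 ++ b3 := by
        have e2 : b0 ++ b1 ++ b2 ++ b3 = b0 ++ (b1 ++ b2 ++ b3) := by simp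
        rw [e2, insertBy_split _ x b0 (b1 ++ b2 ++ b3)
          (fun y hy => before_false x y (by have := h0 y hy; omega))
          (fun z hz => by
            simp only [List.mem_append] at hz
            have : 1 ≤ snpKey z := by
              rcases hz with (h | h) | h
              · have := h1 z h; omega
              · have := h2 z h; omega
              · have := h3 z h; omega
            simp only [decide_eq_true_eq]; omega)]
        simp
      rw [e, ih (b0 ++ [x]) b1 b2 b3
        (fun v hv => by rcases List.mem_append.1 hv with hv | hv; exact h0 v hv; simp_all)
        h1 h2 h3]
      simp [hx]
    · have e : PySem.List.insertBy (fun a b => decide (snpKey a < snpKey b)) x (b0 ++ b1 ++ b2 ++ b3)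
          = b0 ++ (b1 ++ [x]) ++ b2 ++ b3 := by
        have e2 : b0 ++ b1 ++ b2 ++ b3 = (b0 ++ b1) ++ (b2 ++ b3) := by simp
        rw [e2, insertBy_split _ x (b0 ++ b1) (b2 ++ b3)
          (fun y hy => before_false x y (by
            rcases List.mem_append.1 hy with h | h
            · have := h0 y h; omega
            · have := h1 y h; omega))
          (fun z hz => by
            have : 2 ≤ snpKey z := by
              rcases List.mem_append.1 hz with h | h
              · have := h2 z h; omega
              · have := h3 z h; omega
            simp only [decide_eq_true_eq]; omega)]
        simp
      rw [e, ih b0 (b1 ++ [x]) b2 b3 h0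
        (fun v hv => by rcases List.mem_append.1 hv with hv | hv; exact h1 v hv; simp_all)
        h2 h3]
      simp [hx]
    · have e : PySem.List.insertBy (fun a b => decide (snpKey a < snpKey b)) x (b0 ++ b1 ++ b2 ++ b3)
          = b0 ++ b1 ++ (b2 ++ [x]) ++ b3 := by
        rw [insertBy_split _ x (b0 ++ b1 ++ b2) b3
          (fun y hy => before_false x y (by
            simp only [List.mem_append] at hy
            rcases hy with (h | h) | h
            · have := h0 y h; omega
            · have := h1 y h; omega
            · have := h2 y h; omega))
          (fun z hz => by have := h3 z hz; simp only [decide_eq_true_eq]; omega)]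
        simp
      rw [e, ih b0 b1 (b2 ++ [x]) b3 h0 h1
        (fun v hv => by rcases List.mem_append.1 hv with hv | hv; exact h2 v hv; simp_all)
        h3]
      simp [hx]
    · have e : PySem.List.insertBy (fun a b => decide (snpKey a < snpKey b)) x (b0 ++ b1 ++ b2 ++ b3)
          = b0 ++ b1 ++ b2 ++ (b3 ++ [x]) := by
        rw [PySem.List.insertBy_of_forall_not_before _ x _
          (fun y hy => before_false x y (by
            simp only [List.mem_append] at hy
            rcases hy with ((h | h) | h) | h
            · have := h0 y h; omega
            · have := h1 y h; omega
            · have := h2 y h; omega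
            · have := h3 y h; omega))]
        simp
      rw [e, ih b0 b1 b2 (b3 ++ [x]) h0 h1 h2
        (fun v hv => by rcases List.mem_append.1 hv with hv | hv; exact h3 v hv; simp_all)]
      simp [hx]

-- ===== VERDICT (by name: the statement is the Claim_ definition above) =====
theorem sort_snpeff_spec : Claim_equal_sort_snpeff := by
  intro xs _ _
  unfold Spec_sort_snpeff sort_snpeff sort_snpeff_alt
  rw [show (fun val => snpeffRank.getD (PySem.List.pyGetD val 3 "") 3) = snpKey from rfl]
  rw [PySem.List.sorted_eq_foldl_insertBy]
  have hB := B_state xs [] [] [] [] (by simp) (by simp) (by simp) (by simp)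
  simp only [List.nil_append, List.append_nil] at hB
  rw [hB, A_state]
  simp
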